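-- pv_equiv track=rewrite | github.com/desmetr/SchakenPython | chesspiece.py | possibleMovesLeftDown
-- ===== SOURCE A (Python) =====
-- def possibleMovesLeftDown(r, c):
-- 	possibleMoves = []; rowsDone = []; columnsDone = []
-- 	possibleRowsToGoDown = 7 - r
-- 	possibleColumnsToGoLeft = c
-- 	for i in range(r, 8):
-- 		for j in range(possibleColumnsToGoLeft, -1, -1):
-- 			if r < i <= r + possibleRowsToGoDown and j < possibleColumnsToGoLeft and \
-- 				i not in rowsDone and j not in columnsDone:
-- 					possibleMoves.append((i, j))
-- 					rowsDone.append(i)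
-- 					columnsDone.append(j)
--
-- 	if (r,c) in possibleMoves:
-- 		possibleMoves.remove((r,c))
--
-- 	return list(set(possibleMoves))
-- ===== SOURCE B (Python) =====
-- def possibleMovesLeftDown(r, c):
--     moves = []
--     i, j = r + 1, c - 1
--     while i < 8 and j >= 0:
--         moves.append((i, j))
--         i += 1
--         j -= 1
--     return list(set(moves))
-- ===== Notes on version B (the rewrite author's own statement) =====
-- stated objective: simpler
-- what changed: Replaced the nested row/column loops with their rowsDone/columnsDone bookkeeping lists and the final removal check by a single walk down the diagonal starting one row below and one column left of the square, stepping down-left while on the board; the list(set(...)) wrapper is kept since the collected cells are distinct.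
import Mathlib
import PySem

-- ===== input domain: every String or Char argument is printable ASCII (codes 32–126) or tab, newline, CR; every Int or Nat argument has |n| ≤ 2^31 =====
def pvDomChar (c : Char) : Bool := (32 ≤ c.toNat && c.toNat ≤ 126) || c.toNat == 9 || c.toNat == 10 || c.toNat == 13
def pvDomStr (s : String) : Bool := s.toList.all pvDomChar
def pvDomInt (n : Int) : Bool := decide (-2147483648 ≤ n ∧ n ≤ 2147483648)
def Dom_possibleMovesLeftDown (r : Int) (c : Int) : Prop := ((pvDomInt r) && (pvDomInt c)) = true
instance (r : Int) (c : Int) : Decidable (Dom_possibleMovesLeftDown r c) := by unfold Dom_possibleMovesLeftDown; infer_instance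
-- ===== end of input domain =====

-- B replaces A's nested row/column scans with bookkeeping lists by a single walk down the down-left diagonal (objective: simpler); same return value on every input.
-- ===== PORT A =====
-- A-side helpers: the inner-loop step and the inner loop itself, literal from A's code
def pvStepA (r c i : Int) (st : List (Int × Int) × List Int × List Int) (j : Int) :
    List (Int × Int) × List Int × List Int :=
  if r < i ∧ i ≤ r + (7 - r) ∧ j < c ∧ i ∉ st.2.1 ∧ j ∉ st.2.2 then
    (st.1 ++ [(i, j)], st.2.1 ++ [i], st.2.2 ++ [j])
  else st

def pvInnerA (r c : Int) (st : List (Int × Int) × List Int × List Int) (i : Int) :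
    List (Int × Int) × List Int × List Int :=
  (PySem.List.pyRange c (-1) (-1)).foldl (pvStepA r c i) st

def possibleMovesLeftDown (r : Int) (c : Int) : List (Int × Int) :=
  let st := (PySem.List.pyRange r 8 1).foldl (pvInnerA r c) ([], [], [])
  let moves := if (r, c) ∈ st.1 then (PySem.List.remove? st.1 (r, c)).getD st.1 else st.1
  PySem.Set.ofList moves

-- ===== PORT B =====
-- B-side helper: the while loop of Source B (i,j walk down-left, appending to acc)
def pvGoB (i j : Int) (acc : List (Int × Int)) : List (Int × Int) :=
  if i < 8 ∧ 0 ≤ j then pvGoB (i + 1) (j - 1) (acc ++ [(i, j)]) else acc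
termination_by (8 - i).toNat
decreasing_by omega

def possibleMovesLeftDown_alt (r : Int) (c : Int) : List (Int × Int) :=
  PySem.Set.ofList (pvGoB (r + 1) (c - 1) [])


-- ===== PRECONDITION & SPEC =====
def Spec_possibleMovesLeftDown (r : Int) (c : Int) (out : List (Int × Int)) : Prop := out = possibleMovesLeftDown_alt r c
instance (r : Int) (c : Int) (out : List (Int × Int)) : Decidable (Spec_possibleMovesLeftDown r c out) := by unfold Spec_possibleMovesLeftDown; infer_instance

-- ===== CLAIM (what is proved, stated in full; the proofs are below) =====
def Claim_equal_possibleMovesLeftDown : Prop := ∀ (r : Int) (c : Int), Dom_possibleMovesLeftDown r c → Spec_possibleMovesLeftDown r c (possibleMovesLeftDown r c)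

-- ===== LEMMAS AND PROOFS =====

-- number of diagonal moves
def pvN (r c : Int) : Nat := (min (7 - r) c).toNat

-- the first t diagonal cells
def pvDiag (r c : Int) (t : Nat) : List (Int × Int) :=
  (List.range t).map (fun (k : Nat) => (r + 1 + (k : Int), c - 1 - (k : Int)))

-- the loop state of A after t appends
def pvSt (r c : Int) (t : Nat) : List (Int × Int) × List Int × List Int :=
  (pvDiag r c t, (List.range t).map (fun (k : Nat) => r + 1 + (k : Int)),
   (List.range t).map (fun (k : Nat) => c - 1 - (k : Int)))

theorem pvFoldlId {α β : Type} (f : β → α → β) (st : β) (L : List α)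
    (h : ∀ a ∈ L, f st a = st) : L.foldl f st = st := by
  induction L with
  | nil => rfl
  | cons x xs ih =>
      simp only [List.foldl_cons, h x (by simp)]
      exact ih (fun a ha => h a (by simp [ha]))

theorem pvStepA_skip (r c i : Int) (t : Nat) (j : Int)
    (h : ¬ r < i ∨ ¬ j < c ∨ (c - (t : Int) ≤ j ∧ j ≤ c - 1)) :
    pvStepA r c i (pvSt r c t) j = pvSt r c t := by
  unfold pvStepA
  rw [if_neg]
  rintro ⟨h1, h2, h3, h4, h5⟩
  rcases h with h | h | ⟨hj0, hj1⟩
  · exact h h1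
  · exact h h3
  · apply h5
    simp only [pvSt, List.mem_map]
    exact ⟨(c - 1 - j).toNat, List.mem_range.mpr (by omega), by omega⟩

theorem pvInnerA_skip_left (r c : Int) (t : Nat) : pvInnerA r c (pvSt r c t) r = pvSt r c t := by
  apply pvFoldlId
  intro j _
  exact pvStepA_skip r c r t j (Or.inl (by omega))

theorem pvInnerA_skip_stall (r c i : Int) (t : Nat) (hc : (c : Int) ≤ t) :
    pvInnerA r c (pvSt r c t) i = pvSt r c t := by
  apply pvFoldlId
  intro j hj
  rw [PySem.List.mem_pyRange_neg_one] at hj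
  by_cases hjc : j < c
  · exact pvStepA_skip r c i t j (Or.inr (Or.inr ⟨by omega, by omega⟩))
  · exact pvStepA_skip r c i t j (Or.inr (Or.inl hjc))

theorem pvStepA_fire (r c : Int) (t : Nat) (h7 : r + 1 + (t : Int) ≤ 7) (_hc : (t : Int) + 1 ≤ c) :
    pvStepA r c (r + 1 + (t : Int)) (pvSt r c t) (c - 1 - (t : Int)) = pvSt r c (t + 1) := by
  unfold pvStepA
  rw [if_pos]
  · simp [pvSt, pvDiag, List.range_succ]
  · refine ⟨by omega, by omega, by omega, ?_, ?_⟩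
    · simp only [pvSt, List.mem_map]
      rintro ⟨k, hk, he⟩
      rw [List.mem_range] at hk
      omega
    · simp only [pvSt, List.mem_map]
      rintro ⟨k, hk, he⟩
      rw [List.mem_range] at hk
      omega

theorem pvInnerA_adv_aux (r c : Int) (t : Nat) (h7 : r + 1 + (t : Int) ≤ 7)
    (hc : (t : Int) + 1 ≤ c) :
    ∀ (d : Nat) (j0 : Int), j0 = c - 1 - (t : Int) + (d : Int) → j0 ≤ c →
      (PySem.List.pyRange j0 (-1) (-1)).foldl (pvStepA r c (r + 1 + (t : Int))) (pvSt r c t) =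
        pvSt r c (t + 1) := by
  intro d
  induction d with
  | zero =>
      intro j0 hj0 _
      rw [PySem.List.pyRange_neg_one_cons (by omega), List.foldl_cons]
      have hfire : j0 = c - 1 - (t : Int) := by omega
      rw [hfire, pvStepA_fire r c t h7 hc]
      apply pvFoldlId
      intro j hj
      rw [PySem.List.mem_pyRange_neg_one] at hj
      unfold pvStepA
      rw [if_neg]
      rintro ⟨_, _, _, h4, _⟩
      apply h4
      simp only [pvSt, List.mem_map]
      exact ⟨t, List.mem_range.mpr (by omega), rfl⟩
  | succ d ih =>
      intro j0 hj0 hle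
      rw [PySem.List.pyRange_neg_one_cons (by omega), List.foldl_cons]
      by_cases hjc : j0 < c
      · rw [pvStepA_skip r c _ t j0 (Or.inr (Or.inr ⟨by omega, by omega⟩))]
        exact ih (j0 - 1) (by omega) (by omega)
      · rw [pvStepA_skip r c _ t j0 (Or.inr (Or.inl hjc))]
        exact ih (j0 - 1) (by omega) (by omega)

theorem pvInnerA_adv (r c : Int) (t : Nat) (ht : t < pvN r c) :
    pvInnerA r c (pvSt r c t) (r + 1 + (t : Int)) = pvSt r c (t + 1) := by
  have hn : (pvN r c : Int) = max (min (7 - r) c) 0 := by unfold pvN; omega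
  have h7 : r + 1 + (t : Int) ≤ 7 := by omega
  have hc : (t : Int) + 1 ≤ c := by omega
  exact pvInnerA_adv_aux r c t h7 hc (t + 1) c (by push_cast; ring) (by omega)

theorem pvOuter (r c : Int) :
    ∀ (d : Nat) (a : Int) (t : Nat), (8 - a).toNat = d → r < a → a ≤ 8 → t ≤ pvN r c →
      ((t : Int) = a - r - 1 ∨ ((c : Int) ≤ (t : Int) ∧ t = pvN r c)) →
      (PySem.List.pyRange a 8 1).foldl (pvInnerA r c) (pvSt r c t) = pvSt r c (pvN r c) := by
  have hn : (pvN r c : Int) = max (min (7 - r) c) 0 := by unfold pvN; omega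
  intro d
  induction d with
  | zero =>
      intro a t hd _ _ htn hcase
      rw [PySem.List.pyRange_one_eq_nil (by omega), List.foldl_nil]
      have ht : t = pvN r c := by
        rcases hcase with h | ⟨_, h⟩
        · omega
        · exact h
      rw [ht]
  | succ d ih =>
      intro a t hd hra ha8 htn hcase
      have ha7 : a ≤ 7 := by omega
      rw [PySem.List.pyRange_one_cons (by omega), List.foldl_cons]
      by_cases hlt : t < pvN r c
      · have hat : (t : Int) = a - r - 1 := by
          rcases hcase with h | ⟨_, h⟩
          · exact h
          · omega
        have hstep : pvInnerA r c (pvSt r c t) a = pvSt r c (t + 1) := by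
          rw [show a = r + 1 + (t : Int) by omega]
          exact pvInnerA_adv r c t hlt
        rw [hstep]
        exact ih (a + 1) (t + 1) (by omega) (by omega) (by omega) (by omega)
          (Or.inl (by push_cast; omega))
      · have ht : t = pvN r c := by omega
        have hct : (c : Int) ≤ (t : Int) := by
          rcases hcase with h | ⟨h, _⟩
          · omega
          · exact h
        rw [pvInnerA_skip_stall r c a t hct]
        exact ih (a + 1) t (by omega) (by omega) (by omega) htn (Or.inr ⟨hct, ht⟩)

theorem pvA_state (r c : Int) :
    (PySem.List.pyRange r 8 1).foldl (pvInnerA r c) ([], [], []) = pvSt r c (pvN r c) := by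
  have hn : (pvN r c : Int) = max (min (7 - r) c) 0 := by unfold pvN; omega
  have h0 : (([], [], []) : List (Int × Int) × List Int × List Int) = pvSt r c 0 := by
    simp [pvSt, pvDiag]
  by_cases h8 : r < 8
  · rw [PySem.List.pyRange_one_cons (by omega), List.foldl_cons, h0, pvInnerA_skip_left]
    exact pvOuter r c (8 - (r + 1)).toNat (r + 1) 0 rfl (by omega) (by omega) (by omega)
      (Or.inl (by omega))
  · rw [PySem.List.pyRange_one_eq_nil (by omega), List.foldl_nil, h0]
    have h : pvN r c = 0 := by omega
    rw [h]

theorem pvDiag_nodup (r c : Int) (t : Nat) : (pvDiag r c t).Nodup := by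
  unfold pvDiag
  refine List.Nodup.map ?_ List.nodup_range
  intro k1 k2 h
  simp only [Prod.mk.injEq] at h
  omega

theorem pvRC_not_mem (r c : Int) (t : Nat) : (r, c) ∉ pvDiag r c t := by
  simp only [pvDiag, List.mem_map]
  rintro ⟨k, _, he⟩
  simp only [Prod.mk.injEq] at he
  omega

theorem pvGoB_eq (r c : Int) :
    ∀ (d t : Nat) (acc : List (Int × Int)), d = pvN r c - t → t ≤ pvN r c →
      pvGoB (r + 1 + (t : Int)) (c - 1 - (t : Int)) acc =
        acc ++ (List.range (pvN r c - t)).map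
          (fun (k : Nat) => (r + 1 + (t : Int) + (k : Int), c - 1 - (t : Int) - (k : Int))) := by
  have hn : (pvN r c : Int) = max (min (7 - r) c) 0 := by unfold pvN; omega
  intro d
  induction d with
  | zero =>
      intro t acc hd htn
      have ht : t = pvN r c := by omega
      rw [pvGoB, if_neg (by omega)]
      simp [ht]
  | succ d ih =>
      intro t acc hd htn
      have hlt : t < pvN r c := by omega
      rw [pvGoB, if_pos (by omega)]
      have h1 : r + 1 + (t : Int) + 1 = r + 1 + ((t + 1 : Nat) : Int) := by push_cast; ring
      have h2 : c - 1 - (t : Int) - 1 = c - 1 - ((t + 1 : Nat) : Int) := by push_cast; ring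
      rw [h1, h2, ih (t + 1) _ (by omega) (by omega)]
      have h3 : pvN r c - t = (pvN r c - (t + 1)) + 1 := by omega
      rw [h3, List.range_succ_eq_map, List.map_cons, List.map_map, List.append_assoc,
        List.singleton_append]
      congr 1
      congr 1
      · simp
      · refine List.map_congr_left ?_
        intro k _
        simp only [Function.comp_apply, Prod.mk.injEq]
        push_cast
        omega

theorem pvAlt_eq (r c : Int) : possibleMovesLeftDown_alt r c = pvDiag r c (pvN r c) := by
  unfold possibleMovesLeftDown_alt
  have h := pvGoB_eq r c (pvN r c) 0 [] (by omega) (by omega)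
  have e1 : r + 1 + ((0 : Nat) : Int) = r + 1 := by simp
  have e2 : c - 1 - ((0 : Nat) : Int) = c - 1 := by simp
  rw [e1, e2] at h
  rw [h]
  simp only [List.nil_append, Nat.sub_zero]
  show PySem.Set.ofList (pvDiag r c (pvN r c)) = pvDiag r c (pvN r c)
  exact PySem.Set.ofList_eq_self_of_nodup _ (pvDiag_nodup r c _)

-- ===== VERDICT (by name: the statement is the Claim_ definition above) =====
theorem possibleMovesLeftDown_spec : Claim_equal_possibleMovesLeftDown := by
  intro r c _
  unfold Spec_possibleMovesLeftDown possibleMovesLeftDown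
  rw [pvA_state r c]
  simp only [pvSt]
  rw [if_neg (pvRC_not_mem r c _), pvAlt_eq r c]
  exact PySem.Set.ofList_eq_self_of_nodup _ (pvDiag_nodup r c _)
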